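-- pv_equiv track=rewrite | github.com/hongminjoon/Freshman_repo | coding_test_python/1_30/65.py | solution
-- ===== SOURCE A (Python) =====
-- def solution(s):
--     answer = 0
--
--     is_x = True
--     same_cnt = 0
--     diff_cnt = 0
--     for char in s:
--         if is_x:
--             x = char
--             is_x = False
--             answer += 1
--
--         if char == x:
--             same_cnt += 1
--         elif char != x:
--             diff_cnt += 1
--
--         if same_cnt == diff_cnt:
--             is_x = True
--             same_cnt = 0
--             diff_cnt = 0
--
--     return answer
-- ===== SOURCE B (Python) =====
-- def solution(s):
--     # Pair-wise scan: within a group the same/diff balance after an odd number of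
--     # characters is odd, so it can only reach zero on a pair boundary; therefore the
--     # string can be consumed two characters at a time with a single halved counter.
--     n = len(s)
--     answer = 0
--     i = 0
--     while i < n:
--         answer += 1
--         x = s[i]
--         bal = 0
--         j = i
--         while j + 1 < n:
--             bal += (s[j] == x) + (s[j + 1] == x) - 1
--             j += 2
--             if bal == 0:
--                 break
--         if bal == 0 and j > i:
--             i = j
--         else:
--             i = n
--     return answer
-- ===== Notes on version B (the rewrite author's own statement) =====
-- stated objective: alternative
-- what changed: Replaces A's per-character scan with two counters and a reset flag by a pair-wise scan: using the parity invariant that a group's same/diff balance can only vanish on an even boundary, B consumes the string two characters at a time with a single halved balance counter per group.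
import Mathlib
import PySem

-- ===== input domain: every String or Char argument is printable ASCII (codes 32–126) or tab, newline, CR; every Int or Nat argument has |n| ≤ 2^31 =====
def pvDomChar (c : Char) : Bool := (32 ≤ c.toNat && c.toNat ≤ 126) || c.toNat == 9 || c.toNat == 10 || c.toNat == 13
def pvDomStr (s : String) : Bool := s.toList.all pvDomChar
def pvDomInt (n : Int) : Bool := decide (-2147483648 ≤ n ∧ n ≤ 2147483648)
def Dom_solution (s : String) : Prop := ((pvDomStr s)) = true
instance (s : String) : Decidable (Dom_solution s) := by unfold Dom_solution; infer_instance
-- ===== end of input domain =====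

-- B replaces A's per-character scan with flags/two counters by a pair-wise scan with a
-- single halved balance counter per group (objective: alternative; same O(n) cost).

-- ===== PORT A =====
-- A's for-loop over the characters, carrying (answer, is_x, same_cnt, diff_cnt, x).
-- x is uninitialised in Python until the first iteration; is_x = true guarantees it is
-- written before it is read, so the port carries a dummy initial 'a'.
def solLoopA : List Char → Int → Bool → Int → Int → Char → Int
  | [], answer, _, _, _, _ => answer
  | c :: rest, answer, is_x, same_cnt, diff_cnt, x =>
      let x' := if is_x then c else x
      let answer' := if is_x then answer + 1 else answer
      let same' := if c = x' then same_cnt + 1 else same_cnt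
      let diff' := if c = x' then diff_cnt else diff_cnt + 1
      if same' = diff' then solLoopA rest answer' true 0 0 x'
      else solLoopA rest answer' false same' diff' x'

def solution (s : String) : Int := solLoopA s.toList 0 true 0 0 'a'

-- ===== PORT B =====
-- Source B's inner pair loop starting at the group's first index: consume two chars at a
-- time updating bal; 'some rest' is the break with bal == 0 (i = j), 'none' is falling
-- off the end with fewer than two chars left (i = n).
def consumePairs (x : Char) (bal : Int) : List Char → Option (List Char)
  | c1 :: c2 :: rest =>
      let bal' := bal + ((if c1 = x then (1 : Int) else 0) + (if c2 = x then 1 else 0) - 1)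
      if bal' = 0 then some rest else consumePairs x bal' rest
  | _ => none

-- the suffix left for the outer loop: i = j on a break, i = n (empty suffix) otherwise
def pairRest (x : Char) (l : List Char) : List Char := (consumePairs x 0 l).getD []

theorem consumePairs_length_aux {x : Char} (n : Nat) :
    ∀ {l : List Char}, l.length ≤ n → ∀ {bal : Int} {r : List Char},
      consumePairs x bal l = some r → r.length + 2 ≤ l.length := by
  induction n with
  | zero =>
      intro l hl bal r h
      match l with
      | [] => simp [consumePairs] at h
      | [c] => simp [consumePairs] at h
      | c1 :: c2 :: rest => simp at hl
  | succ n ih =>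
      intro l hl bal r h
      match l with
      | [] => simp [consumePairs] at h
      | [c] => simp [consumePairs] at h
      | c1 :: c2 :: rest =>
          simp only [consumePairs] at h
          by_cases hb : bal + ((if c1 = x then (1 : Int) else 0) +
              (if c2 = x then 1 else 0) - 1) = 0
          · rw [if_pos hb] at h
            cases h; simp
          · rw [if_neg hb] at h
            have := ih (l := rest) (by simp at hl; omega) h
            simp; omega

theorem consumePairs_length {x : Char} {bal : Int} {l r : List Char}
    (h : consumePairs x bal l = some r) : r.length + 2 ≤ l.length :=
  consumePairs_length_aux l.length le_rfl h

theorem pairRest_length_lt (x : Char) (c : Char) (rest : List Char) :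
    (pairRest x (c :: rest)).length < (c :: rest).length := by
  unfold pairRest
  match h : consumePairs x 0 (c :: rest) with
  | some r =>
      have := consumePairs_length h
      simp only [Option.getD_some]
      simp at this ⊢
      omega
  | none => simp

-- Source B's outer while loop: one iteration per group.
def outerB : List Char → Int
  | [] => 0
  | x :: rest => 1 + outerB (pairRest x (x :: rest))
termination_by l => l.length
decreasing_by exact pairRest_length_lt x x rest

def solution_alt (s : String) : Int := outerB s.toList

-- ===== PRECONDITION & SPEC =====
def Spec_solution (s : String) (out : Int) : Prop := out = solution_alt s
instance (s : String) (out : Int) : Decidable (Spec_solution s out) := by unfold Spec_solution; infer_instance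

-- ===== CLAIM (what is proved, stated in full; the proofs are below) =====
def Claim_equal_solution : Prop := ∀ (s : String), Dom_solution s → Spec_solution s (solution s)

-- ===== LEMMAS AND PROOFS =====

-- Proof-side intermediate: a per-character group consumer (the rest of the current
-- group, leader x already counted), bridging A's flat loop and B's pair loop.
def consumeGroup (x : Char) (same diff : Int) : List Char → List Char
  | [] => []
  | c :: rest =>
      let same' := if c = x then same + 1 else same
      let diff' := if c = x then diff else diff + 1
      if same' = diff' then rest else consumeGroup x same' diff' rest

theorem consumeGroup_length_le (x : Char) (same diff : Int) (l : List Char) :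
    (consumeGroup x same diff l).length ≤ l.length := by
  induction l generalizing same diff with
  | nil => simp [consumeGroup]
  | cons c rest ih =>
      simp only [consumeGroup]
      split <;> split
      · simp
      · exact Nat.le_succ_of_le (ih _ _)
      · simp
      · exact Nat.le_succ_of_le (ih _ _)

def countGroups : List Char → Int
  | [] => 0
  | x :: rest => 1 + countGroups (consumeGroup x 1 0 rest)
termination_by l => l.length
decreasing_by exact Nat.lt_succ_of_le (consumeGroup_length_le x 1 0 rest)

-- A's flat loop equals the per-character group decomposition.
theorem solLoop_eq (l : List Char) :
    (∀ (ans same diff : Int) (x : Char),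
        solLoopA l ans false same diff x = ans + countGroups (consumeGroup x same diff l)) ∧
    (∀ (ans : Int) (x : Char), solLoopA l ans true 0 0 x = ans + countGroups l) := by
  induction l with
  | nil => constructor <;> intros <;> simp [solLoopA, consumeGroup, countGroups]
  | cons c rest ih =>
      constructor
      · intro ans same diff x
        simp only [solLoopA, consumeGroup, Bool.false_eq_true, if_false]
        split <;> split
        · exact ih.2 ans x
        · exact ih.1 ans _ _ x
        · exact ih.2 ans x
        · exact ih.1 ans _ _ x
      · intro ans x
        rw [show solLoopA (c :: rest) ans true 0 0 x = solLoopA rest (ans + 1) false 1 0 c from by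
              simp [solLoopA],
            ih.1 (ans + 1) 1 0 c, countGroups]
        ring

-- Pair-alignment invariant: at a pair boundary inside a group the same/diff balance is
-- even and positive (= 2 * bal, bal ≥ 1), and after one more character it is odd and
-- hence nonzero, so the per-character consumer can only stop where the pair consumer
-- stops: both leave the same suffix.
theorem consumeGroup_eq_pairs (n : Nat) :
    ∀ (r : List Char), r.length ≤ n → ∀ (same diff bal : Int) (x : Char),
      same - diff = 2 * bal → 1 ≤ bal →
      consumeGroup x same diff r = (consumePairs x bal r).getD [] := by
  induction n with
  | zero =>
      intro r hr same diff bal x _ _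
      match r with
      | [] => simp [consumeGroup, consumePairs]
      | c :: t => simp at hr
  | succ n ih =>
      intro r hr same diff bal x hbal hpos
      match r with
      | [] => simp [consumeGroup, consumePairs]
      | [c] =>
          -- one char left: both consume everything (A's balance is odd, no reset matters)
          simp only [consumeGroup, consumePairs]
          split <;> simp
      | c1 :: c2 :: rest =>
          have hlen : rest.length ≤ n := by simp at hr; omega
          by_cases h1 : c1 = x <;> by_cases h2 : c2 = x <;>
            simp only [consumeGroup, consumePairs, h1, h2, if_true, if_false]
          · rw [if_neg (show ¬ (same + 1 = diff) by omega),
                if_neg (show ¬ (same + 1 + 1 = diff) by omega),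
                if_neg (show ¬ (bal + ((1 : Int) + 1 - 1) = 0) by omega)]
            exact ih rest hlen _ _ _ x (by omega) (by omega)
          · rw [if_neg (show ¬ (same + 1 = diff) by omega),
                if_neg (show ¬ (same + 1 = diff + 1) by omega),
                if_neg (show ¬ (bal + ((1 : Int) + 0 - 1) = 0) by omega)]
            exact ih rest hlen _ _ _ x (by omega) (by omega)
          · rw [if_neg (show ¬ (same = diff + 1) by omega),
                if_neg (show ¬ (same + 1 = diff + 1) by omega),
                if_neg (show ¬ (bal + ((0 : Int) + 1 - 1) = 0) by omega)]
            exact ih rest hlen _ _ _ x (by omega) (by omega)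
          · rw [if_neg (show ¬ (same = diff + 1) by omega)]
            by_cases hz : same = diff + 1 + 1
            · rw [if_pos hz, if_pos (show bal + ((0 : Int) + 0 - 1) = 0 by omega)]
              rfl
            · rw [if_neg hz, if_neg (show ¬ (bal + ((0 : Int) + 0 - 1) = 0) by omega)]
              exact ih rest hlen _ _ _ x (by omega) (by omega)

-- The first pair of B's inner loop contains the group leader x itself; peeling it off
-- aligns it with the per-character consumer started after the leader.
theorem consumeGroup_eq_pairRest (x : Char) (rest : List Char) :
    consumeGroup x 1 0 rest = pairRest x (x :: rest) := by
  unfold pairRest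
  match rest with
  | [] => simp [consumeGroup, consumePairs]
  | c2 :: rest2 =>
      by_cases h2 : c2 = x
      · have hcp : consumePairs x 0 (x :: c2 :: rest2) = consumePairs x 1 rest2 := by
          simp only [consumePairs, h2, if_true]
          rw [if_neg (show ¬ ((0 : Int) + (1 + 1 - 1) = 0) by omega)]
          norm_num
        have hcg : consumeGroup x 1 0 (c2 :: rest2) = consumeGroup x 2 0 rest2 := by
          simp only [consumeGroup, h2, if_true]
          rw [if_neg (show ¬ ((1 : Int) + 1 = 0) by omega)]
          norm_num
        rw [hcg, hcp, consumeGroup_eq_pairs rest2.length rest2 le_rfl 2 0 1 x (by ring) (by omega)]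
      · -- balanced first pair (x, non-x): the group is exactly these two chars
        have hcp : consumePairs x 0 (x :: c2 :: rest2) = some rest2 := by
          simp only [consumePairs, h2, if_true, if_false]
          rw [if_pos (show (0 : Int) + (1 + 0 - 1) = 0 by omega)]
        have hcg : consumeGroup x 1 0 (c2 :: rest2) = rest2 := by
          simp only [consumeGroup, h2, if_false]
          rw [if_pos (show (1 : Int) = 0 + 1 by omega)]
        rw [hcg, hcp]
        rfl

theorem countGroups_eq_outerB (n : Nat) :
    ∀ (l : List Char), l.length ≤ n → countGroups l = outerB l := by
  induction n with
  | zero =>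
      intro l hl
      match l with
      | [] => simp [countGroups, outerB]
      | c :: t => simp at hl
  | succ n ih =>
      intro l hl
      match l with
      | [] => simp [countGroups, outerB]
      | x :: rest =>
          rw [countGroups, outerB, consumeGroup_eq_pairRest]
          congr 1
          exact ih (pairRest x (x :: rest))
            (by have := pairRest_length_lt x x rest; simp at hl this ⊢; omega)

-- ===== VERDICT (by name: the statement is the Claim_ definition above) =====
theorem solution_spec : Claim_equal_solution := by
  intro s _
  unfold Spec_solution solution solution_alt
  rw [(solLoop_eq s.toList).2 0 'a',
      countGroups_eq_outerB s.toList.length s.toList le_rfl]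
  ring
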